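-- pv_equiv track=rewrite | github.com/s-smits/EasyDeL-GSPO | easydel/verification/reward_utils.py | replicate_to_length
-- ===== SOURCE A (Python) =====
-- from typing import Any, List
--
-- def replicate_to_length(items: List[str], target_len: int) -> List[str]:
--     """Replicate items to exactly target_len elements, preserving order.
--
--     If items is empty, returns [""] * target_len.
--     """
--     if target_len <= 0:
--         return []
--     if not items:
--         return [""] * target_len
--     if len(items) == target_len:
--         return items
--     if target_len % len(items) == 0:
--         factor = target_len // len(items)
--         return [x for x in items for _ in range(factor)]
--     times = (target_len + len(items) - 1) // len(items)
--     return (items * times)[:target_len]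
-- ===== SOURCE B (Python) =====
-- from typing import Any, List
--
-- def replicate_to_length(items: List[str], target_len: int) -> List[str]:
--     """Replicate items to exactly target_len elements, preserving order.
--
--     Divisible case: build chunk by chunk with an accumulator.
--     Otherwise: round-robin with an explicit rotating cursor.
--     """
--     if target_len <= 0:
--         return []
--     if not items:
--         return ["" for _ in range(target_len)]
--     if len(items) == target_len:
--         return items
--     if target_len % len(items) == 0:
--         factor = target_len // len(items)
--         out = []
--         for x in items:
--             out += [x] * factor
--         return out
--     out = []
--     cur = iter(items)
--     for _ in range(target_len):
--         v = next(cur, None)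
--         if v is None:
--             cur = iter(items)
--             v = next(cur)
--         out.append(v)
--     return out
-- ===== Notes on version B (the rewrite author's own statement) =====
-- stated objective: alternative
-- what changed: Replaces A's nested comprehension with an accumulator loop appending one [x]*factor chunk per item, and replaces the list-multiply-then-slice of the non-divisible case with a round-robin loop over a rotating cursor that re-arms from items when exhausted.
import Mathlib
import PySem

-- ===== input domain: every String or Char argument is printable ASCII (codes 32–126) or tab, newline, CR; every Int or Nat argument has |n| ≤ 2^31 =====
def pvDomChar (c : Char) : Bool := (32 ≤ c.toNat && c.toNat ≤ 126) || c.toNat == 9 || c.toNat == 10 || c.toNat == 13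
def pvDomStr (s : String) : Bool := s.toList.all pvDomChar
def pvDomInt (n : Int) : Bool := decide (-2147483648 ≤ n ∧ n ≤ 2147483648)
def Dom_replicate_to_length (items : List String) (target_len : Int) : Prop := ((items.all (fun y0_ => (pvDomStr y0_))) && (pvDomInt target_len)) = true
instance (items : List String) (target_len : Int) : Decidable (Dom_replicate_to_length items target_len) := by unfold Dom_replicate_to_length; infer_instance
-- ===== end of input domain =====

-- B builds the divisible case chunk by chunk with an accumulator and the non-divisible
-- case by a round-robin rotating cursor, instead of A's nested comprehension and
-- list-multiply-then-slice (objective: alternative).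
-- ===== PORT A =====
def replicate_to_length (items : List String) (target_len : Int) : List String :=
  if target_len ≤ 0 then []
  else if items = [] then PySem.List.pyRepeat [""] target_len
  else if (items.length : Int) = target_len then items
  else if PySem.Int.mod target_len items.length = 0 then
    let factor := PySem.Int.floordiv target_len items.length
    items.flatMap (fun x => (PySem.List.pyRange 0 factor 1).map (fun _ => x))
  else
    let times := PySem.Int.floordiv (target_len + items.length - 1) items.length
    PySem.List.slice (PySem.List.pyRepeat items times) none (some target_len)

-- ===== PORT B =====
-- Round-robin cursor: take the head of `cur`, re-arming the cursor from `items`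
-- whenever it runs out; `fuel` counts the remaining output slots.
def rtlRoundRobin (items : List String) : Nat → List String → List String
  | 0, _ => []
  | Nat.succ fuel, [] =>
      match items with
      | [] => []
      | x :: xs => x :: rtlRoundRobin items fuel xs
  | Nat.succ fuel, y :: ys => y :: rtlRoundRobin items fuel ys

def replicate_to_length_alt (items : List String) (target_len : Int) : List String :=
  if target_len ≤ 0 then []
  else if items = [] then (PySem.List.pyRange 0 target_len 1).map (fun _ => "")
  else if (items.length : Int) = target_len then items
  else if PySem.Int.mod target_len items.length = 0 then
    let factor := PySem.Int.floordiv target_len items.length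
    items.foldl (fun out x => out ++ List.replicate factor.toNat x) []
  else
    rtlRoundRobin items target_len.toNat items

-- ===== PRECONDITION & SPEC =====
def Spec_replicate_to_length (items : List String) (target_len : Int) (out : List String) : Prop := out = replicate_to_length_alt items target_len
instance (items : List String) (target_len : Int) (out : List String) : Decidable (Spec_replicate_to_length items target_len out) := by unfold Spec_replicate_to_length; infer_instance

-- ===== CLAIM (what is proved, stated in full; the proofs are below) =====
def Claim_equal_replicate_to_length : Prop := ∀ (items : List String) (target_len : Int), Dom_replicate_to_length items target_len → Spec_replicate_to_length items target_len (replicate_to_length items target_len)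

-- ===== LEMMAS AND PROOFS =====

-- Accumulator loop appending chunks = flatMap of the chunk function.
lemma foldl_append_chunks (g : String → List String) :
    ∀ (l : List String) (acc : List String),
      l.foldl (fun out x => out ++ g x) acc = acc ++ l.flatMap g := by
  intro l
  induction l with
  | nil => simp
  | cons x xs ih => intro acc; simp [List.foldl_cons, ih, List.append_assoc]

lemma length_flatten_replicate (t : Nat) (l : List String) :
    ((List.replicate t l).flatten).length = t * l.length := by
  simp only [List.length_flatten, List.map_replicate, List.sum_replicate, smul_eq_mul]


-- The round-robin recursion is a take of the cursor followed by enough full copies.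
lemma rtlRoundRobin_eq_take (x : String) (xs : List String) :
    ∀ (t : Nat) (cur : List String),
      rtlRoundRobin (x :: xs) t cur = (cur ++ (List.replicate t (x :: xs)).flatten).take t := by
  intro t
  induction t with
  | zero => intro cur; simp [rtlRoundRobin]
  | succ t ih =>
    intro cur
    match cur with
    | [] =>
      simp only [rtlRoundRobin, List.nil_append, List.replicate_succ,
        List.flatten_cons, List.cons_append, List.take_succ_cons]
      rw [ih xs]
    | y :: ys =>
      simp only [rtlRoundRobin, List.cons_append, List.take_succ_cons]
      rw [ih ys]
      congr 1
      have hstep : (List.replicate (t+1) (x :: xs)).flatten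
          = (List.replicate t (x :: xs)).flatten ++ (x :: xs) := by
        rw [List.replicate_succ', List.flatten_append]; simp
      have hlen : t ≤ (ys ++ (List.replicate t (x :: xs)).flatten).length := by
        simp only [List.length_append, length_flatten_replicate, List.length_cons]
        nlinarith [Nat.zero_le ys.length]
      rw [hstep, ← List.append_assoc, List.take_append_of_le_length hlen]

-- take t of M full copies is independent of M as long as M copies suffice.
lemma take_flatten_replicate (l : List String) (t M K : Nat)
    (hM : t ≤ M * l.length) (hMK : M ≤ K) :
    ((List.replicate M l).flatten).take t = ((List.replicate K l).flatten).take t := by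
  have hK : K = M + (K - M) := by omega
  rw [hK, List.replicate_add, List.flatten_append]
  have hlen : t ≤ ((List.replicate M l).flatten).length := by
    rw [length_flatten_replicate]; exact hM
  rw [List.take_append_of_le_length hlen]

-- ===== VERDICT (by name: the statement is the Claim_ definition above) =====
theorem replicate_to_length_spec : Claim_equal_replicate_to_length := by
  intro items t _
  unfold Spec_replicate_to_length replicate_to_length replicate_to_length_alt
  by_cases h1 : t ≤ 0
  · simp [h1]
  by_cases h2 : items = []
  · simp only [h1, if_false, h2, if_true]
    rw [PySem.List.pyRepeat_singleton, PySem.List.pyRange_one, List.map_map]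
    simp only [Function.comp_def, List.map_const', List.length_range, Int.sub_zero]
  by_cases h3 : (items.length : Int) = t
  · simp [h1, h2, h3]
  have hn : 0 < items.length := List.length_pos_iff.mpr h2
  have hnI : (0:Int) < (items.length : Int) := by exact_mod_cast hn
  have htI : 0 < t := by omega
  by_cases h4 : PySem.Int.mod t items.length = 0
  · simp only [h1, h2, h3, h4, if_false]
    obtain ⟨c, hc⟩ : (items.length : Int) ∣ t :=
      (PySem.Int.mod_eq_zero_iff_dvd t (items.length : Int)).mp h4
    have hcpos : 0 < c := by nlinarith
    have hfac : PySem.Int.floordiv t (items.length : Int) = c := by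
      rw [PySem.Int.floordiv_eq_ediv_of_pos hnI, hc,
          Int.mul_ediv_cancel_left _ (ne_of_gt hnI)]
    rw [hfac, foldl_append_chunks, List.nil_append]
    apply List.flatMap_congr
    intro x _
    rw [PySem.List.pyRange_one, List.map_map]
    simp only [Function.comp_def, List.map_const', List.length_range, Int.sub_zero]
  · simp only [h1, h2, h3, h4, if_false]
    obtain ⟨x, xs, rfl⟩ : ∃ x xs, items = x :: xs := by
      cases items with
      | nil => exact absurd rfl h2
      | cons a l => exact ⟨a, l, rfl⟩
    set nI : Int := ((x :: xs).length : Int) with hnIdef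
    set q := PySem.Int.floordiv (t + nI - 1) nI with hq
    have hmul := PySem.Int.floordiv_mul_add_mod (t + nI - 1) nI
    have hr0 := PySem.Int.mod_nonneg (t + nI - 1) hnI
    have hrlt := PySem.Int.mod_lt (t + nI - 1) hnI
    have hqpos : 0 < q := by nlinarith
    have hqle : q ≤ t := by nlinarith
    set M : Nat := q.toNat with hM
    have hqM : q = (M : Int) := (Int.toNat_of_nonneg (le_of_lt hqpos)).symm
    have htq : t ≤ q * nI := by nlinarith
    have hTle : t.toNat ≤ M * (x :: xs).length := by
      have h : t ≤ ((M * (x :: xs).length : Nat) : Int) := by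
        rw [hqM] at htq; push_cast at htq ⊢; linarith
      omega
    have hMT : M ≤ t.toNat + 1 := by omega
    rw [rtlRoundRobin_eq_take x xs t.toNat (x :: xs),
        PySem.List.slice_to _ (le_of_lt htI)]
    have hgrow : (x :: xs) ++ (List.replicate t.toNat (x :: xs)).flatten
        = (List.replicate (t.toNat + 1) (x :: xs)).flatten := by
      rw [List.replicate_succ, List.flatten_cons]
    rw [hgrow]
    have hrep : PySem.List.pyRepeat (x :: xs) q = (List.replicate M (x :: xs)).flatten := by
      simp [PySem.List.pyRepeat, hM]
    rw [hrep]
    exact take_flatten_replicate (x :: xs) t.toNat M (t.toNat + 1) hTle hMT
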